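-- pv_equiv track=rewrite | github.com/andycranston/udpsend | udpsend.py | ishexstring
-- ===== SOURCE A (Python) =====
-- import string
--
-- def ishexstring(s):
--     if len(s) < 4:
--         return False
--
--     s = s.lower()
--
--     if s[0:2] != '0x':
--         return False
--
--     if (len(s) % 2) != 0:
--         return False
--
--     for h in s[2:]:
--         if not h in string.hexdigits:
--             return False
--
--     return True
-- ===== SOURCE B (Python) =====
-- HEX = frozenset('0123456789abcdef')
--
-- def ishexstring(s):
--     # alternative: lowercase, check the '0x' prefix, then consume the body two
--     # hexdigits at a time; odd length and len<4 fall out of the pair consumption,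
--     # so the explicit length/parity guards of the original disappear.
--     t = s.lower()
--     if not t.startswith('0x'):
--         return False
--     body = t[2:]
--     if body == '':
--         return False
--     while body:
--         if len(body) == 1:
--             return False
--         if body[0] not in HEX or body[1] not in HEX:
--             return False
--         body = body[2:]
--     return True
-- ===== Notes on version B (the rewrite author's own statement) =====
-- stated objective: alternative
-- what changed: Instead of guarding on length and parity and then scanning the body character by character, B checks the lowercased '0x' prefix and then consumes the body two hexdigits at a time in a pair-consuming loop, from which the len<4 and even-length conditions fall out implicitly.
import Mathlib
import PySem

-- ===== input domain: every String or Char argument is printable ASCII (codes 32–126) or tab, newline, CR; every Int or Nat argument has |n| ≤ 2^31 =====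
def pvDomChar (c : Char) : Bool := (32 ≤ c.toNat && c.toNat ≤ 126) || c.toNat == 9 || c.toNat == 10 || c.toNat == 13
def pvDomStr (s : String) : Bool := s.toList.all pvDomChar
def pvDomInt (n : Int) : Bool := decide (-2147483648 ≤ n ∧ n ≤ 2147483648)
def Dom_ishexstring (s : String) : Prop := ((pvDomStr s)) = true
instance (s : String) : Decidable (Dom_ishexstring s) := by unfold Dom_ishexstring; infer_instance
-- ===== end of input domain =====

-- B lowercases, checks the '0x' prefix, then consumes the body two hexdigits at a time,
-- so A's explicit length and parity guards disappear (objective: alternative).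


-- ===== PORT A =====
-- string.hexdigits
def hexdigits : List Char := "0123456789abcdefABCDEF".toList

-- the 'for h in s[2:]' loop with its early return
def hexLoopA : List Char → Bool
  | [] => true
  | h :: t => if !(PySem.Chars.isIn [h] hexdigits) then false else hexLoopA t

def ishexstring (s : String) : Bool :=
  if PySem.Str.len s < 4 then false
  else
    let t := PySem.Chars.lower s.toList        -- s = s.lower()
    if PySem.List.slice t (some 0) (some 2) ≠ ['0', 'x'] then false
    else if PySem.Int.mod (t.length : Int) 2 ≠ 0 then false
    else hexLoopA (PySem.List.slice t (some 2) none)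

-- ===== PORT B =====
-- HEX = frozenset('0123456789abcdef')
def hexSet : PySem.Set Char := PySem.Set.ofList "0123456789abcdef".toList

-- the 'while body:' loop consuming two characters per step
def pairLoop : List Char → Bool
  | [] => true
  | [_] => false
  | a :: b :: rest =>
      if !(PySem.Set.contains hexSet a) || !(PySem.Set.contains hexSet b) then false
      else pairLoop rest

def ishexstring_alt (s : String) : Bool :=
  let t := PySem.Chars.lower s.toList
  if !(PySem.Chars.startswith t ['0', 'x']) then false
  else
    let body := PySem.List.slice t (some 2) none
    if body = [] then false
    else pairLoop body

-- ===== PRECONDITION & SPEC =====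
def Spec_ishexstring (s : String) (out : Bool) : Prop := out = ishexstring_alt s
instance (s : String) (out : Bool) : Decidable (Spec_ishexstring s out) := by unfold Spec_ishexstring; infer_instance

-- ===== CLAIM (what is proved, stated in full; the proofs are below) =====
def Claim_equal_ishexstring : Prop := ∀ (s : String), Dom_ishexstring s → Spec_ishexstring s (ishexstring s)

-- ===== LEMMAS AND PROOFS =====

theorem isIn_single_hex (h : Char) :
    PySem.Chars.isIn [h] hexdigits = hexdigits.contains h := by
  rw [Bool.eq_iff_iff, PySem.Chars.isIn_iff_infix, List.singleton_infix_iff]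
  simp

theorem hexLoopA_eq_all (xs : List Char) :
    hexLoopA xs = xs.all (fun h => hexdigits.contains h) := by
  induction xs with
  | nil => rfl
  | cons h t ih =>
    rw [List.all_cons, ← ih, hexLoopA, isIn_single_hex]
    cases hexdigits.contains h <;> simp

-- pairLoop = parity check + per-char hexSet membership
theorem pairLoop_eq (xs : List Char) :
    pairLoop xs = (decide (xs.length % 2 = 0) && xs.all (fun h => PySem.Set.contains hexSet h)) := by
  induction xs using pairLoop.induct with
  | case1 => rfl
  | case2 _ => simp [pairLoop]
  | case3 a b rest hg =>
    simp at hg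
    rcases hg with hg | hg <;> simp [pairLoop, hg]
  | case4 a b rest hg ih =>
    simp [not_or] at hg
    rw [pairLoop, if_neg (by simp [hg.1, hg.2]), ih]
    have hdec2 : decide ((a :: b :: rest).length % 2 = 0) = decide (rest.length % 2 = 0) :=
      decide_eq_decide.mpr (by simp; omega)
    rw [hdec2]
    simp [hg.1, hg.2]

-- on domain chars, the lowercased char is in string.hexdigits iff it is in HEX
set_option maxRecDepth 8192 in
theorem contains_lowerChar_of_dom (c : Char) (h : pvDomChar c = true) :
    hexdigits.contains (PySem.Chars.lowerChar c) = PySem.Set.contains hexSet (PySem.Chars.lowerChar c) := by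
  have key : ∀ n : Nat, n < 127 →
      hexdigits.contains (PySem.Chars.lowerChar (Char.ofNat n)) =
        PySem.Set.contains hexSet (PySem.Chars.lowerChar (Char.ofNat n)) := by decide
  have hb : c.toNat < 127 := by
    simp [pvDomChar] at h
    omega
  have := key c.toNat hb
  rwa [Char.ofNat_toNat] at this

theorem body_all_eq : ∀ (ds : List Char), ds.all pvDomChar = true →
    (List.map PySem.Chars.lowerChar ds).all (fun h => hexdigits.contains h) =
      (List.map PySem.Chars.lowerChar ds).all (fun h => PySem.Set.contains hexSet h) := by
  intro ds
  induction ds with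
  | nil => intro _; rfl
  | cons c t ih =>
    intro hd
    simp only [List.all_cons, Bool.and_eq_true] at hd
    simp only [List.map_cons, List.all_cons]
    rw [contains_lowerChar_of_dom c hd.1, ih hd.2]

-- ===== VERDICT (by name: the statement is the Claim_ definition above) =====
theorem ishexstring_spec : Claim_equal_ishexstring := by
  intro s hdom
  unfold Spec_ishexstring ishexstring ishexstring_alt
  have hdom' : s.toList.all pvDomChar = true := hdom
  rw [PySem.Str.len_eq]
  simp only [PySem.Chars.lower]
  set l := s.toList with hl
  have htake : PySem.List.slice (List.map PySem.Chars.lowerChar l) (some 0) (some 2) =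
      (List.map PySem.Chars.lowerChar l).take 2 := by
    rw [PySem.List.slice_toNat _ (by norm_num) (by norm_num)]
    simp
  have hdrop : PySem.List.slice (List.map PySem.Chars.lowerChar l) (some 2) none =
      (List.map PySem.Chars.lowerChar l).drop 2 := by
    rw [PySem.List.slice_from _ (by norm_num)]
    simp
  have hsw : PySem.Chars.startswith (List.map PySem.Chars.lowerChar l) ['0', 'x'] =
      decide (['0', 'x'] <+: List.map PySem.Chars.lowerChar l) := by
    rw [Bool.eq_iff_iff, PySem.Chars.startswith_iff]
    simp
  rw [htake, hdrop, hsw]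
  by_cases hpre : ['0', 'x'] <+: List.map PySem.Chars.lowerChar l
  · have hlen2 : 2 ≤ l.length := by
      have := hpre.length_le
      simpa using this
    have htk : (List.map PySem.Chars.lowerChar l).take 2 = ['0', 'x'] := by
      rw [List.prefix_iff_eq_take] at hpre
      exact hpre.symm
    rw [htk]
    simp only [decide_eq_true hpre, Bool.not_true, ne_eq, not_true_eq_false,
      Bool.false_eq_true, if_neg (by simp : ¬False)]
    by_cases h4 : (l.length : Int) < 4
    · -- length 2 or 3: A fails the length guard, B's body is empty or a singleton
      rw [if_pos h4]
      have : l.length = 2 ∨ l.length = 3 := by omega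
      have hbl : ((List.map PySem.Chars.lowerChar l).drop 2).length ≤ 1 := by
        simp; omega
      rcases hb : (List.map PySem.Chars.lowerChar l).drop 2 with _ | ⟨a, _ | ⟨b, r⟩⟩
      · simp
      · simp [pairLoop]
      · exfalso; rw [hb] at hbl; simp at hbl
    · rw [if_neg h4]
      have hne : (List.map PySem.Chars.lowerChar l).drop 2 ≠ [] := by
        simp only [ne_eq, List.drop_eq_nil_iff, List.length_map]
        omega
      rw [if_neg hne, pairLoop_eq, hexLoopA_eq_all]
      have hmod : PySem.Int.mod ((List.map PySem.Chars.lowerChar l).length : Int) 2 =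
          ((l.length % 2 : Nat) : Int) := by
        rw [List.length_map]
        exact_mod_cast PySem.Int.mod_natCast l.length 2
      have hparlen : ((List.map PySem.Chars.lowerChar l).drop 2).length % 2 = l.length % 2 := by
        simp only [List.length_drop, List.length_map]
        omega
      have hbody : (List.map PySem.Chars.lowerChar l).drop 2 =
          List.map PySem.Chars.lowerChar (l.drop 2) := by
        rw [List.map_drop]
      have hballeq := body_all_eq (l.drop 2) (by
        simp only [List.all_eq_true] at hdom' ⊢
        exact fun x hx => hdom' x (List.mem_of_mem_drop hx))
      by_cases hpar : l.length % 2 = 0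
      · rw [if_neg (by rw [hmod, hpar]; simp), hparlen, hpar]
        simp only [decide_true, Bool.true_and]
        rw [hbody, hballeq]
      · rw [if_pos (by rw [hmod]; exact fun h => hpar (by exact_mod_cast h)), hparlen]
        simp [hpar]
  · have hdec : decide (['0', 'x'] <+: List.map PySem.Chars.lowerChar l) = false := by
      simpa using hpre
    rw [hdec]
    simp only [Bool.not_false]
    have htkne : ¬ (List.map PySem.Chars.lowerChar l).take 2 = ['0', 'x'] := by
      intro h
      exact hpre (List.prefix_iff_eq_take.mpr h.symm)
    by_cases h4 : (l.length : Int) < 4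
    · rw [if_pos h4]; simp
    · rw [if_neg h4, if_pos htkne]; simp
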